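-- pv_equiv track=rewrite | github.com/meringlab/og_consistency_pipeline | methods/test.py | find_singletons
-- ===== SOURCE A (Python) =====
-- def fast_join(levels, protein_nogs, nog_proteins):
--
--     # join multiple levels in one definition
--     nog_definitions = {} # nog_id => set(protein_ids)
--     protein_definitions = {} # protein_id => nog_id
--
--     for level_id in levels:
--         nog_definitions.update(nog_proteins[level_id])
--         protein_definitions.update(protein_nogs[level_id])
--
--     return nog_definitions, protein_definitions
--
-- def find_singletons(higher_levels,lower_levels,protein_nogs,nog_proteins):
--
--     singletons_inconsistencies = []
--
--     # read definitions
--     lower_nogs,lower_proteins = fast_join(lower_levels,protein_nogs, nog_proteins)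
--     higher_nogs,higher_proteins = fast_join(higher_levels,protein_nogs, nog_proteins)
--
--     for lower_nog,lower_nog_proteins in lower_nogs.items():
--
--         higher_nog = -1
--
--         singleton_inconsistency = False
--         for protein_id in lower_nog_proteins:
--
--             if protein_id not in higher_proteins:
--                 singleton_inconsistency = True
--                 continue
--
--             if higher_nog == -1:
--                 # Initialize NOG (i.e. first protein of the lower_nog)
--                 higher_nog = higher_proteins[protein_id]
--             else:
--                 if higher_nog != higher_proteins[protein_id]:
--                     singleton_inconsistency = False
--                     break
--
--         if singleton_inconsistency:
--             singletons_inconsistencies.append(lower_nog)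
--
--     return singletons_inconsistencies
-- ===== SOURCE B (Python) =====
-- def fast_join(levels, protein_nogs, nog_proteins):
--     # join multiple levels in one definition (unchanged helper)
--     nog_definitions = {}
--     protein_definitions = {}
--     for level_id in levels:
--         nog_definitions.update(nog_proteins[level_id])
--         protein_definitions.update(protein_nogs[level_id])
--     return nog_definitions, protein_definitions
--
-- def find_singletons(higher_levels, lower_levels, protein_nogs, nog_proteins):
--     # staged pipeline instead of A's nested state-machine loop:
--     # 1. flatten everything into (lower_nog, protein) pairs;
--     # 2. one flat pass grouping per-nog aggregates into hash tables
--     #    (a 'missing' set and a nog -> set-of-higher-nogs dict);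
--     # 3. a final selection pass over the keys.
--     lower_nogs, _ = fast_join(lower_levels, protein_nogs, nog_proteins)
--     _, higher_proteins = fast_join(higher_levels, protein_nogs, nog_proteins)
--
--     pairs = [(nog, p) for nog, ps in lower_nogs.items() for p in ps]
--
--     missing = set()   # lower nogs having some protein absent from the higher join
--     mapped = {}       # lower nog -> set of higher nogs its present proteins map to
--     for nog, p in pairs:
--         if p in higher_proteins:
--             mapped.setdefault(nog, set()).add(higher_proteins[p])
--         else:
--             missing.add(nog)
--
--     return [nog for nog in lower_nogs
--             if nog in missing and len(mapped.get(nog, ())) <= 1]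
-- ===== Notes on version B (the rewrite author's own statement) =====
-- stated objective: alternative
-- what changed: Replaces A's nested per-nog sentinel-and-break state machine with a staged pipeline: flatten all (lower_nog, protein) pairs, make one flat hash-grouping pass building a missing-set and a nog->set-of-higher-nogs dict, then select keys in a final pass, so the inner scan with its -1 sentinel and early break disappears.
import Mathlib
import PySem

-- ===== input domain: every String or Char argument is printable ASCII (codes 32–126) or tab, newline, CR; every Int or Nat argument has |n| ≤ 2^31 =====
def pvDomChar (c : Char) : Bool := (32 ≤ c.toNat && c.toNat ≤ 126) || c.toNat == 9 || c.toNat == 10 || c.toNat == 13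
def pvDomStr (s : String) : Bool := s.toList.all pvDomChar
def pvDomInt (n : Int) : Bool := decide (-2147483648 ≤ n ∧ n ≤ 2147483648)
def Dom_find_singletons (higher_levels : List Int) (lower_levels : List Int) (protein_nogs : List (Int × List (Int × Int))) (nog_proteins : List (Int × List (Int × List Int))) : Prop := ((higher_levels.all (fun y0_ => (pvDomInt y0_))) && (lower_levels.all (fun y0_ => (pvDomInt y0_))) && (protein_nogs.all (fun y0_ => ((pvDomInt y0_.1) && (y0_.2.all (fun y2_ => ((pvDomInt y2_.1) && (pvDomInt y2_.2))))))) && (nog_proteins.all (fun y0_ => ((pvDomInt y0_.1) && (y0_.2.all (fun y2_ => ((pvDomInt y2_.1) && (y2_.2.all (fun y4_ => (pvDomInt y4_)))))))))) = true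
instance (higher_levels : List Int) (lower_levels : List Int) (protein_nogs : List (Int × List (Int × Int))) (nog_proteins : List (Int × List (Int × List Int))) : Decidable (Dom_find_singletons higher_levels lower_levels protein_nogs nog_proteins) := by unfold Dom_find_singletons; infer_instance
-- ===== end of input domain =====

-- B replaces A's nested sentinel-and-break state machine by a staged pipeline: flatten to
-- (nog, protein) pairs, one flat hash-grouping pass, then a selection pass (same cost).

-- ===== PORT A =====
-- fast_join: shared helper, used verbatim by both A and B.
-- `nog_proteins[level_id]` / `protein_nogs[level_id]` raise KeyError when level_id is
-- absent; the `.getD []` below is reached only outside Pre_find_singletons.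
def fast_join (levels : List Int) (protein_nogs : List (Int × List (Int × Int))) (nog_proteins : List (Int × List (Int × List Int))) : PySem.Dict Int (List Int) × PySem.Dict Int Int :=
  levels.foldl
    (fun st level_id =>
      (st.1.update (((PySem.Dict.mk nog_proteins).get? level_id).getD []),
       st.2.update (((PySem.Dict.mk protein_nogs).get? level_id).getD [])))
    ((PySem.Dict.mk []), (PySem.Dict.mk []))

-- A's inner loop: sentinel higher_nog (init -1), flag, early `break` (returns false).
def aScan (higher_proteins : PySem.Dict Int Int) : List Int → Int → Bool → Bool
  | [], _, flag => flag
  | protein_id :: rest, higher_nog, flag =>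
    match higher_proteins.get? protein_id with
    | none => aScan higher_proteins rest higher_nog true
    | some v =>
      if higher_nog = -1 then aScan higher_proteins rest v flag
      else if higher_nog ≠ v then false
      else aScan higher_proteins rest higher_nog flag

def find_singletons (higher_levels : List Int) (lower_levels : List Int) (protein_nogs : List (Int × List (Int × Int))) (nog_proteins : List (Int × List (Int × List Int))) : List Int :=
  let lower := fast_join lower_levels protein_nogs nog_proteins
  let higher := fast_join higher_levels protein_nogs nog_proteins
  lower.1.items.foldl
    (fun acc it => if aScan higher.2 it.2 (-1) false then acc ++ [it.1] else acc) []

-- ===== PORT B =====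
-- one step of B's flat grouping pass over a (nog, protein) pair:
-- mapped.setdefault(nog, set()).add(v) is Dict.modify nog [] (add · v); missing.add(nog).
def flatStep (higher_proteins : PySem.Dict Int Int) (st : PySem.Set Int × PySem.Dict Int (PySem.Set Int)) (q : Int × Int) : PySem.Set Int × PySem.Dict Int (PySem.Set Int) :=
  match higher_proteins.get? q.2 with
  | some v => (st.1, st.2.modify q.1 [] (fun s => PySem.Set.add s v))
  | none => (PySem.Set.add st.1 q.1, st.2)

def find_singletons_alt (higher_levels : List Int) (lower_levels : List Int) (protein_nogs : List (Int × List (Int × Int))) (nog_proteins : List (Int × List (Int × List Int))) : List Int :=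
  let lower := fast_join lower_levels protein_nogs nog_proteins
  let higher := fast_join higher_levels protein_nogs nog_proteins
  -- stage 1: flatten
  let pairs := lower.1.items.flatMap (fun it => it.2.map (fun p => (it.1, p)))
  -- stage 2: one flat grouping pass
  let st := pairs.foldl (flatStep higher.2) (PySem.Set.empty, PySem.Dict.empty)
  -- stage 3: selection over the keys
  (lower.1.items.map Prod.fst).filter
    (fun nog => st.1.contains nog && decide ((st.2.getD nog []).length ≤ 1))

-- ===== PRECONDITION & SPEC =====
-- Pre_ excludes (a) inputs where some level id in higher_levels/lower_levels is missing
-- from protein_nogs or nog_proteins, on which A raises KeyError, and (b) inputs where -1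
-- occurs as a mapped nog id at a higher level, on which A's -1 sentinel conflates a real
-- nog with 'uninitialized' so A's result depends on Python's unspecified set iteration order.
def Pre_find_singletons (higher_levels : List Int) (lower_levels : List Int) (protein_nogs : List (Int × List (Int × Int))) (nog_proteins : List (Int × List (Int × List Int))) : Prop :=
  (∀ l ∈ higher_levels ++ lower_levels, l ∈ protein_nogs.map Prod.fst ∧ l ∈ nog_proteins.map Prod.fst) ∧
  (∀ e ∈ protein_nogs, e.1 ∈ higher_levels → ∀ pr ∈ e.2, pr.2 ≠ -1)
instance (higher_levels : List Int) (lower_levels : List Int) (protein_nogs : List (Int × List (Int × Int))) (nog_proteins : List (Int × List (Int × List Int))) : Decidable (Pre_find_singletons higher_levels lower_levels protein_nogs nog_proteins) := by unfold Pre_find_singletons; infer_instance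

def pvWitness_find_singletons : List Int × List Int × (List (Int × List (Int × Int))) × (List (Int × List (Int × List Int))) :=
  ([1], [2], [(1, [(10, 100), (11, 100)]), (2, [(10, 100), (11, 100)])],
   [(1, [(100, [10, 11])]), (2, [(5, [10, 11, 12]), (6, [10, 13])])])

def Spec_find_singletons (higher_levels : List Int) (lower_levels : List Int) (protein_nogs : List (Int × List (Int × Int))) (nog_proteins : List (Int × List (Int × List Int))) (out : List Int) : Prop := out = find_singletons_alt higher_levels lower_levels protein_nogs nog_proteins
instance (higher_levels : List Int) (lower_levels : List Int) (protein_nogs : List (Int × List (Int × Int))) (nog_proteins : List (Int × List (Int × List Int))) (out : List Int) : Decidable (Spec_find_singletons higher_levels lower_levels protein_nogs nog_proteins out) := by unfold Spec_find_singletons; infer_instance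

-- ===== CLAIM (what is proved, stated in full; the proofs are below) =====
def Claim_equal_find_singletons : Prop := ∀ (higher_levels : List Int) (lower_levels : List Int) (protein_nogs : List (Int × List (Int × Int))) (nog_proteins : List (Int × List (Int × List Int))), Dom_find_singletons higher_levels lower_levels protein_nogs nog_proteins → Pre_find_singletons higher_levels lower_levels protein_nogs nog_proteins → Spec_find_singletons higher_levels lower_levels protein_nogs nog_proteins (find_singletons higher_levels lower_levels protein_nogs nog_proteins)

-- ===== LEMMAS AND PROOFS =====

-- proof-side abbreviation: the effect of B's flat pass restricted to one key k,
-- as a fold over that key's protein list on a (collected set, missing flag) state.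
def keyStep (hp : PySem.Dict Int Int) (st : PySem.Set Int × Bool) (protein_id : Int) : PySem.Set Int × Bool :=
  match hp.get? protein_id with
  | some v => (PySem.Set.add st.1 v, st.2)
  | none => (st.1, true)

-- the per-key fold can only grow the collected set.
lemma keyFold_len_mono (hp : PySem.Dict Int Int) :
    ∀ (l : List Int) (s : PySem.Set Int) (m : Bool),
      s.length ≤ (l.foldl (keyStep hp) (s, m)).1.length := by
  intro l
  induction l with
  | nil => intro s m; simp
  | cons p rest ih =>
    intro s m
    simp only [List.foldl_cons]
    cases h : hp.get? p with
    | none =>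
      simpa [keyStep, h] using ih s true
    | some v =>
      have : keyStep hp (s, m) p = (PySem.Set.add s v, m) := by simp [keyStep, h]
      rw [this]
      refine le_trans ?_ (ih (PySem.Set.add s v) m)
      simp only [PySem.Set.add_eq_ite]
      split <;> simp

-- A's sentinel scan computes exactly the "missing and at most one distinct mapped nog"
-- decision of the per-key fold, when no mapped value is -1 (Pre_'s clause (b)).
lemma scan_eq (hp : PySem.Dict Int Int)
    (Hv : ∀ p v, hp.get? p = some v → v ≠ -1) :
    ∀ (l : List Int) (s : PySem.Set Int) (h : Int) (flag : Bool),
      ((h = -1 ∧ s = []) ∨ (h ≠ -1 ∧ s = [h])) →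
      aScan hp l h flag =
        ((l.foldl (keyStep hp) (s, flag)).2
          && decide ((l.foldl (keyStep hp) (s, flag)).1.length ≤ 1)) := by
  intro l
  induction l with
  | nil =>
    intro s h flag hs
    rcases hs with ⟨_, rfl⟩ | ⟨_, rfl⟩ <;> simp [aScan]
  | cons p rest ih =>
    intro s h flag hs
    cases hget : hp.get? p with
    | none =>
      have hstep : keyStep hp (s, flag) p = (s, true) := by simp [keyStep, hget]
      simp only [aScan, List.foldl_cons, hget, hstep]
      exact ih s h true hs
    | some v =>
      have hstep : keyStep hp (s, flag) p = (PySem.Set.add s v, flag) := by simp [keyStep, hget]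
      simp only [aScan, List.foldl_cons, hget, hstep]
      have hv : v ≠ -1 := Hv p v hget
      rcases hs with ⟨hh, rfl⟩ | ⟨hh, rfl⟩
      · subst hh
        rw [if_pos rfl]
        have hs1 : PySem.Set.add ([] : PySem.Set Int) v = [v] := rfl
        rw [hs1]
        exact ih [v] v flag (Or.inr ⟨hv, rfl⟩)
      · rw [if_neg hh]
        by_cases hv2 : h = v
        · subst hv2
          rw [if_neg (by simp)]
          have hs1 : PySem.Set.add ([h] : PySem.Set Int) h = [h] := by
            simp [PySem.Set.add_of_mem]
          rw [hs1]
          exact ih [h] h flag (Or.inr ⟨hh, rfl⟩)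
        · rw [if_pos (by simpa using hv2)]
          have hadd : PySem.Set.add ([h] : PySem.Set Int) v = [h, v] := by
            simp [PySem.Set.add_of_not_mem, Ne.symm hv2]
          rw [hadd]
          have hmono := keyFold_len_mono hp rest [h, v] flag
          have hlen : ¬ ((rest.foldl (keyStep hp) ([h, v], flag)).1.length ≤ 1) := by
            simp only [List.length_cons] at hmono ⊢
            omega
          simp [hlen]

-- Set.add at a different element does not change contains.
lemma contains_add_of_ne (s : PySem.Set Int) {x k : Int} (h : x ≠ k) :
    (PySem.Set.add s x).contains k = s.contains k := by
  simp only [PySem.Set.add_eq_ite]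
  split
  · rfl
  · simp [PySem.Set.contains]
    intro he
    exact absurd he.symm h

lemma contains_add_self (s : PySem.Set Int) (k : Int) :
    (PySem.Set.add s k).contains k = true := by
  simp only [PySem.Set.add_eq_ite]
  split
  · simp [PySem.Set.contains]
    assumption
  · simp [PySem.Set.contains]

-- pairs whose nog is not k leave key k's aggregates untouched.
lemma flat_untouched (hp : PySem.Dict Int Int) (k : Int) :
    ∀ (qs : List (Int × Int)) (st : PySem.Set Int × PySem.Dict Int (PySem.Set Int)),
      (∀ q ∈ qs, q.1 ≠ k) →
      ((qs.foldl (flatStep hp) st).1.contains k = st.1.contains k ∧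
       (qs.foldl (flatStep hp) st).2.getD k [] = st.2.getD k []) := by
  intro qs
  induction qs with
  | nil => intro st _; exact ⟨rfl, rfl⟩
  | cons q rest ih =>
    intro st hne
    have hq : q.1 ≠ k := hne q (by simp)
    simp only [List.foldl_cons]
    have hrest := ih (flatStep hp st q) (fun r hr => hne r (List.mem_cons_of_mem _ hr))
    cases hget : hp.get? q.2 with
    | none =>
      have hstep : flatStep hp st q = (PySem.Set.add st.1 q.1, st.2) := by
        simp [flatStep, hget]
      refine ⟨hrest.1.trans ?_, hrest.2.trans ?_⟩ <;> rw [hstep]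
      exact contains_add_of_ne st.1 hq
    | some v =>
      have hstep : flatStep hp st q = (st.1, st.2.modify q.1 [] (fun s => PySem.Set.add s v)) := by
        simp [flatStep, hget]
      refine ⟨hrest.1.trans ?_, hrest.2.trans ?_⟩ <;> rw [hstep]
      exact PySem.Dict.getD_modify_of_ne _ _ _ (Ne.symm hq)

-- the segment of pairs carrying key k acts on k's aggregates exactly as the per-key fold.
lemma flat_segment (hp : PySem.Dict Int Int) (k : Int) :
    ∀ (ps : List Int) (st : PySem.Set Int × PySem.Dict Int (PySem.Set Int)),
      (((ps.map (fun p => (k, p))).foldl (flatStep hp) st).1.contains k =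
        (ps.foldl (keyStep hp) (st.2.getD k [], st.1.contains k)).2 ∧
       ((ps.map (fun p => (k, p))).foldl (flatStep hp) st).2.getD k [] =
        (ps.foldl (keyStep hp) (st.2.getD k [], st.1.contains k)).1) := by
  intro ps
  induction ps with
  | nil => intro st; exact ⟨rfl, rfl⟩
  | cons p rest ih =>
    intro st
    simp only [List.map_cons, List.foldl_cons]
    cases hget : hp.get? p with
    | none =>
      have hstep : flatStep hp st (k, p) = (PySem.Set.add st.1 k, st.2) := by
        simp [flatStep, hget]
      have hkstep : keyStep hp (st.2.getD k [], st.1.contains k) p = (st.2.getD k [], true) := by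
        simp [keyStep, hget]
      rw [hstep, hkstep]
      have := ih (PySem.Set.add st.1 k, st.2)
      simpa [contains_add_self] using this
    | some v =>
      have hstep : flatStep hp st (k, p) = (st.1, st.2.modify k [] (fun s => PySem.Set.add s v)) := by
        simp [flatStep, hget]
      have hkstep : keyStep hp (st.2.getD k [], st.1.contains k) p =
          (PySem.Set.add (st.2.getD k []) v, st.1.contains k) := by
        simp [keyStep, hget]
      rw [hstep, hkstep]
      have := ih (st.1, st.2.modify k [] (fun s => PySem.Set.add s v))
      simpa [PySem.Dict.getD_modify_self] using this

-- over a nodup-keyed items list, the flat pass's aggregates at key k are the per-key fold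
-- of k's own protein list from the initial aggregates.
lemma flat_pass (hp : PySem.Dict Int Int) :
    ∀ (its : List (Int × List Int)) (k : Int) (ps : List Int)
      (st : PySem.Set Int × PySem.Dict Int (PySem.Set Int)),
      (its.map Prod.fst).Nodup → (k, ps) ∈ its →
      (((its.flatMap (fun it => it.2.map (fun p => (it.1, p)))).foldl (flatStep hp) st).1.contains k =
        (ps.foldl (keyStep hp) (st.2.getD k [], st.1.contains k)).2 ∧
       ((its.flatMap (fun it => it.2.map (fun p => (it.1, p)))).foldl (flatStep hp) st).2.getD k [] =
        (ps.foldl (keyStep hp) (st.2.getD k [], st.1.contains k)).1) := by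
  intro its
  induction its with
  | nil => intro k ps st _ hmem; simp at hmem
  | cons it rest ih =>
    intro k ps st hnd hmem
    simp only [List.flatMap_cons, List.foldl_append]
    rcases List.mem_cons.mp hmem with heq | htail
    · -- (k, ps) is the head: its segment acts, the rest leaves k untouched.
      have hk : it.1 = k := by rw [← heq]
      have hps : it.2 = ps := by rw [← heq]
      have hrestne : ∀ q ∈ rest.flatMap (fun it => it.2.map (fun p => (it.1, p))), q.1 ≠ k := by
        intro q hq
        rcases List.mem_flatMap.mp hq with ⟨e, he, hqe⟩
        rcases List.mem_map.mp hqe with ⟨p, _, rfl⟩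
        intro hqk
        have : k ∈ rest.map Prod.fst := by
          rw [← hqk]; exact List.mem_map_of_mem he
        rw [← hk] at this
        exact (List.nodup_cons.mp (by simpa using hnd)).1 this
      have hseg := flat_segment hp k ps st
      have hun := flat_untouched hp k _
        ((it.2.map (fun p => (it.1, p))).foldl (flatStep hp) st) hrestne
      rw [hk, hps] at *
      exact ⟨hun.1.trans hseg.1, hun.2.trans hseg.2⟩
    · -- (k, ps) is in the tail: the head's segment (key it.1 ≠ k) leaves k untouched.
      have hne : it.1 ≠ k := by
        intro hkk
        have : k ∈ rest.map Prod.fst := by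
          have := List.mem_map_of_mem (f := Prod.fst) htail
          simpa using this
        rw [← hkk] at this
        exact (List.nodup_cons.mp (by simpa using hnd)).1 this
      have hheadne : ∀ q ∈ it.2.map (fun p => (it.1, p)), q.1 ≠ k := by
        intro q hq
        rcases List.mem_map.mp hq with ⟨p, _, rfl⟩
        exact hne
      have hun := flat_untouched hp k _ st hheadne
      have := ih k ps ((it.2.map (fun p => (it.1, p))).foldl (flatStep hp) st)
        ((List.nodup_cons.mp (by simpa using hnd)).2) htail
      rw [hun.1, hun.2] at this
      exact this

-- keys of the lower join are nodup (fold of updates from the empty dict).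
lemma fast_join_keys_nodup (levels : List Int) (protein_nogs : List (Int × List (Int × Int))) (nog_proteins : List (Int × List (Int × List Int))) :
    ((fast_join levels protein_nogs nog_proteins).1.items.map Prod.fst).Nodup := by
  unfold fast_join
  suffices h : ∀ (ls : List Int) (st : PySem.Dict Int (List Int) × PySem.Dict Int Int),
      st.1.keys.Nodup →
      ((ls.foldl (fun st level_id =>
        (st.1.update (((PySem.Dict.mk nog_proteins).get? level_id).getD []),
         st.2.update (((PySem.Dict.mk protein_nogs).get? level_id).getD []))) st).1.keys).Nodup by
    have := h levels ((PySem.Dict.mk []), (PySem.Dict.mk [])) (by simp [PySem.Dict.keys])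
    simpa [PySem.Dict.keys] using this
  intro ls
  induction ls with
  | nil => intro st h; exact h
  | cons l rest ih =>
    intro st h
    simp only [List.foldl_cons]
    exact ih _ (PySem.Dict.nodup_keys_update _ _ h)

-- Every value of `d.update pairs` is an old value of d or a value from pairs.
lemma update_values_prop (P : Int → Prop) :
    ∀ (pairs : List (Int × Int)) (d : PySem.Dict Int Int),
      (∀ k v, d.get? k = some v → P v) → (∀ pr ∈ pairs, P pr.2) →
      ∀ k v, (d.update pairs).get? k = some v → P v := by
  intro pairs
  induction pairs with
  | nil => intro d hd _ k v h; simp [PySem.Dict.update] at h; exact hd k v h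
  | cons pr rest ih =>
    intro d hd hp k v h
    simp only [PySem.Dict.update, List.foldl_cons] at h
    refine ih (d.insert pr.1 pr.2) ?_ (fun q hq => hp q (List.mem_cons_of_mem _ hq)) k v
      (by simpa [PySem.Dict.update] using h)
    intro k' v' h'
    rw [PySem.Dict.get?_insert] at h'
    split at h'
    · exact Option.some_inj.mp h' ▸ hp pr (by simp)
    · exact hd k' v' h'

-- All values of the higher protein→nog join are ≠ -1, given Pre_'s clause (b).
lemma higher_values_ne (higher_levels : List Int) (protein_nogs : List (Int × List (Int × Int))) (nog_proteins : List (Int × List (Int × List Int)))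
    (H : ∀ e ∈ protein_nogs, e.1 ∈ higher_levels → ∀ pr ∈ e.2, pr.2 ≠ -1) :
    ∀ p v, (fast_join higher_levels protein_nogs nog_proteins).2.get? p = some v → v ≠ -1 := by
  unfold fast_join
  have hsplit : higher_levels.foldl
      (fun st level_id =>
        (st.1.update (((PySem.Dict.mk nog_proteins).get? level_id).getD []),
         st.2.update (((PySem.Dict.mk protein_nogs).get? level_id).getD [])))
      ((PySem.Dict.mk []), (PySem.Dict.mk [])) =
      (higher_levels.foldl
        (fun d level_id => d.update (((PySem.Dict.mk nog_proteins).get? level_id).getD []))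
        (PySem.Dict.mk []),
       higher_levels.foldl
        (fun d level_id => d.update (((PySem.Dict.mk protein_nogs).get? level_id).getD []))
        (PySem.Dict.mk [])) :=
    PySem.List.foldl_prod_mk
      (fun (d : PySem.Dict Int (List Int)) (level_id : Int) =>
        d.update (((PySem.Dict.mk nog_proteins).get? level_id).getD []))
      (fun (d : PySem.Dict Int Int) (level_id : Int) =>
        d.update (((PySem.Dict.mk protein_nogs).get? level_id).getD []))
      higher_levels _ _
  rw [hsplit]
  simp only
  suffices h : ∀ (ls : List Int), (∀ l ∈ ls, l ∈ higher_levels) →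
      ∀ (d : PySem.Dict Int Int), (∀ k v, d.get? k = some v → v ≠ -1) →
      ∀ p v, (ls.foldl (fun d2 level_id => d2.update (((PySem.Dict.mk protein_nogs).get? level_id).getD [])) d).get? p = some v → v ≠ -1 by
    intro p v hv
    exact h higher_levels (fun _ hl => hl) (PySem.Dict.mk []) (by simp [PySem.Dict.get?]) p v hv
  intro ls
  induction ls with
  | nil => intro _ d hd p v h; exact hd p v h
  | cons l rest ih =>
    intro hmem d hd
    simp only [List.foldl_cons]
    refine ih (fun x hx => hmem x (List.mem_cons_of_mem _ hx)) _ ?_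
    refine update_values_prop (fun v => v ≠ -1) _ d hd ?_
    intro pr hpr
    cases hget : (PySem.Dict.mk protein_nogs).get? l with
    | none => rw [hget] at hpr; simp at hpr
    | some m =>
      rw [hget] at hpr
      simp only [Option.getD_some] at hpr
      have := PySem.Dict.mem_items_of_get?_eq_some _ hget
      exact H (l, m) this (hmem l (by simp)) pr hpr

-- ===== VERDICT (by name: the statement is the Claim_ definition above) =====
theorem find_singletons_spec : Claim_equal_find_singletons := by
  intro higher_levels lower_levels protein_nogs nog_proteins _ hpre
  unfold Spec_find_singletons find_singletons find_singletons_alt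
  have Hv := higher_values_ne higher_levels protein_nogs nog_proteins hpre.2
  simp only []
  set hp := (fast_join higher_levels protein_nogs nog_proteins).2 with hhp
  set its := (fast_join lower_levels protein_nogs nog_proteins).1.items with hits
  have hnd : (its.map Prod.fst).Nodup := fast_join_keys_nodup _ _ _
  -- A: fold-append-if is filter-then-map
  rw [PySem.List.foldl_append_if (fun it => aScan hp it.2 (-1) false) Prod.fst]
  -- B: filter over map is map over filter
  rw [List.filter_map]
  simp only [List.nil_append]
  congr 1
  apply List.filter_congr
  intro it hit
  have hflat := flat_pass hp its it.1 it.2 (PySem.Set.empty, PySem.Dict.empty) hnd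
    (by simpa using hit)
  have h0 : (((PySem.Set.empty : PySem.Set Int), (PySem.Dict.empty : PySem.Dict Int (PySem.Set Int))) : PySem.Set Int × PySem.Dict Int (PySem.Set Int)).2.getD it.1 [] = ([] : PySem.Set Int) := rfl
  have h1 : (((PySem.Set.empty : PySem.Set Int), (PySem.Dict.empty : PySem.Dict Int (PySem.Set Int))) : PySem.Set Int × PySem.Dict Int (PySem.Set Int)).1.contains it.1 = false := rfl
  rw [h0, h1] at hflat
  simp only [Function.comp]
  rw [scan_eq hp Hv it.2 [] (-1) false (Or.inl ⟨rfl, rfl⟩), hflat.1, hflat.2]
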